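-- pv_equiv track=rewrite | github.com/anderson115/3m-lighting-project | modules/category-intelligence/analyze_jtbd_ingredients.py | _extract_job_from_context
-- ===== SOURCE A (Python) =====
-- def _extract_job_from_context(verbatim: str, context: str) -> str:
--     """Extract the actual job being performed from context"""
--
--     # Common job patterns in lighting installation
--     job_patterns = {
--         'install': ['install', 'installing', 'put up', 'putting up', 'mount', 'mounting'],
--         'level': ['level', 'leveling', 'make even', 'straighten', 'align'],
--         'wire': ['wire', 'wiring', 'connect', 'hardwire'],
--         'position': ['position', 'place', 'locate'],
--         'adjust': ['adjust', 'reposition', 'move'],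
--         'replace': ['replace', 'swap', 'change out'],
--         'illuminate': ['light', 'illuminate', 'brighten'],
--         'decorate': ['decorate', 'accent', 'highlight']
--     }
--
--     text_lower = (verbatim + ' ' + context).lower()
--
--     # Try to identify the job
--     for job_type, patterns in job_patterns.items():
--         if any(pattern in text_lower for pattern in patterns):
--             # Extract what is being lit/installed
--             if 'picture' in text_lower or 'artwork' in text_lower or 'frame' in text_lower:
--                 return f"{job_type.capitalize()} picture/artwork lighting"
--             elif 'closet' in text_lower:
--                 return f"{job_type.capitalize()} closet lighting"
--             elif 'under cabinet' in text_lower or 'cabinet' in text_lower: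
--                 return f"{job_type.capitalize()} under-cabinet lighting"
--             elif 'stair' in text_lower:
--                 return f"{job_type.capitalize()} stair lighting"
--             elif 'bathroom' in text_lower or 'vanity' in text_lower:
--                 return f"{job_type.capitalize()} bathroom/vanity lighting"
--             elif 'garage' in text_lower or 'basement' in text_lower:
--                 return f"{job_type.capitalize()} utility lighting"
--             else:
--                 return f"{job_type.capitalize()} lighting fixture"
--
--     # Fallback - use verbatim if it contains a clear action
--     if any(word in verbatim.lower() for word in ['install', 'put', 'mount', 'add', 'attach']):
--         return verbatim.strip()
--
--     return None
-- ===== SOURCE B (Python) =====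
-- JOB_TABLE = [
--     ('install', ['install', 'installing', 'put up', 'putting up', 'mount', 'mounting']),
--     ('level', ['level', 'leveling', 'make even', 'straighten', 'align']),
--     ('wire', ['wire', 'wiring', 'connect', 'hardwire']),
--     ('position', ['position', 'place', 'locate']),
--     ('adjust', ['adjust', 'reposition', 'move']),
--     ('replace', ['replace', 'swap', 'change out']),
--     ('illuminate', ['light', 'illuminate', 'brighten']),
--     ('decorate', ['decorate', 'accent', 'highlight']),
-- ]
--
-- LOCATION_TABLE = [
--     (['picture', 'artwork', 'frame'], 'picture/artwork lighting'),
--     (['closet'], 'closet lighting'),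
--     (['under cabinet', 'cabinet'], 'under-cabinet lighting'),
--     (['stair'], 'stair lighting'),
--     (['bathroom', 'vanity'], 'bathroom/vanity lighting'),
--     (['garage', 'basement'], 'utility lighting'),
-- ]
--
-- FALLBACK_WORDS = ['install', 'put', 'mount', 'add', 'attach']
--
-- ALL_KEYWORDS = ([p for _, pats in JOB_TABLE for p in pats]
--                 + [k for kws, _ in LOCATION_TABLE for k in kws])
--
--
-- def _scan(text, keywords):
--     """One left-to-right sweep over the text: index the keywords by first
--     character, then at every position check only the keywords whose bucket
--     the current character selects.  Afterwards 'kw in hits' <=> 'kw in text'."""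
--     by_first = {}
--     for kw in keywords:
--         by_first[kw[0]] = by_first.get(kw[0], []) + [kw]
--     hits = set()
--     for i, ch in enumerate(text):
--         for kw in by_first.get(ch, []):
--             if text.startswith(kw, i):
--                 hits.add(kw)
--     return hits
--
--
-- def _extract_job_from_context(verbatim: str, context: str) -> str:
--     text = (verbatim + ' ' + context).lower()
--     # single sweep of the text collects every keyword occurring in it
--     hits = _scan(text, ALL_KEYWORDS)
--     # decisions are now pure set-membership lookups, no further text scanning
--     for job_type, patterns in JOB_TABLE:
--         if any(p in hits for p in patterns):
--             suffix = next((sfx for kws, sfx in LOCATION_TABLE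
--                            if any(k in hits for k in kws)), 'lighting fixture')
--             return f"{job_type.capitalize()} {suffix}"
--     if _scan(verbatim.lower(), FALLBACK_WORDS):
--         return verbatim.strip()
--     return None
-- ===== Notes on version B (the rewrite author's own statement) =====
-- stated objective: alternative
-- what changed: A runs a separate 'pattern in text' substring search for every keyword inside a nested loop/if-elif chain; B indexes the keywords by first character, sweeps the text once left-to-right collecting every keyword that starts at each position into a hit set, and then makes all decisions (job type, location suffix, fallback) as pure set-membership lookups with no further text scanning.
import Mathlib
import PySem

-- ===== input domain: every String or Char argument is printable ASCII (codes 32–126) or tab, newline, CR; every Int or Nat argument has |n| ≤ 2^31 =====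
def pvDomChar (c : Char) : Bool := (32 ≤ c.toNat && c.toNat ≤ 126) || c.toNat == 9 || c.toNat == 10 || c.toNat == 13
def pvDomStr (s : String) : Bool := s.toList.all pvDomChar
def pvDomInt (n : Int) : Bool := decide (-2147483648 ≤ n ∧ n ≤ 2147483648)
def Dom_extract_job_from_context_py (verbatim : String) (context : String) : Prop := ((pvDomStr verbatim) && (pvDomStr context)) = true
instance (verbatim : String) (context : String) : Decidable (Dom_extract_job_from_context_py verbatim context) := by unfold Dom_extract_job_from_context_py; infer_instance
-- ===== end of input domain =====

-- B replaces A's per-keyword substring searches (nested loop with an if-elif chain re-scanning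
-- the text) by a first-character keyword index and ONE left-to-right sweep collecting every
-- occurring keyword into a hit set, after which job type, location suffix and fallback are
-- pure set-membership lookups (objective: alternative); same return value everywhere.

-- str.capitalize() — exact on the ASCII domain: first char uppercased, rest lowercased
def pyCapitalize (s : String) : String :=
  match s.toList with
  | [] => s
  | c :: rest => String.ofList (PySem.Chars.upperChar c :: PySem.Chars.lower rest)

-- ===== PORT A =====
-- the job_patterns dict of A, in insertion order
def pvJobPatternsA : List (String × List String) :=
  [("install", ["install", "installing", "put up", "putting up", "mount", "mounting"]),
   ("level", ["level", "leveling", "make even", "straighten", "align"]),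
   ("wire", ["wire", "wiring", "connect", "hardwire"]),
   ("position", ["position", "place", "locate"]),
   ("adjust", ["adjust", "reposition", "move"]),
   ("replace", ["replace", "swap", "change out"]),
   ("illuminate", ["light", "illuminate", "brighten"]),
   ("decorate", ["decorate", "accent", "highlight"])]

-- A's for-loop with early return: on the first matching job type run the if-elif chain
def pvAJobLoop (t : String) : List (String × List String) → Option String
  | [] => none
  | (job_type, patterns) :: rest =>
    if patterns.any (fun p => PySem.Str.isIn p t) then
      some (if PySem.Str.isIn "picture" t || PySem.Str.isIn "artwork" t || PySem.Str.isIn "frame" t then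
              pyCapitalize job_type ++ " picture/artwork lighting"
            else if PySem.Str.isIn "closet" t then
              pyCapitalize job_type ++ " closet lighting"
            else if PySem.Str.isIn "under cabinet" t || PySem.Str.isIn "cabinet" t then
              pyCapitalize job_type ++ " under-cabinet lighting"
            else if PySem.Str.isIn "stair" t then
              pyCapitalize job_type ++ " stair lighting"
            else if PySem.Str.isIn "bathroom" t || PySem.Str.isIn "vanity" t then
              pyCapitalize job_type ++ " bathroom/vanity lighting"
            else if PySem.Str.isIn "garage" t || PySem.Str.isIn "basement" t then
              pyCapitalize job_type ++ " utility lighting"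
            else
              pyCapitalize job_type ++ " lighting fixture")
    else pvAJobLoop t rest

def extract_job_from_context_py (verbatim : String) (context : String) : Option String :=
  let text_lower := PySem.Str.lower (verbatim ++ " " ++ context)
  match pvAJobLoop text_lower pvJobPatternsA with
  | some r => some r
  | none =>
    if ["install", "put", "mount", "add", "attach"].any
         (fun word => PySem.Str.isIn word (PySem.Str.lower verbatim)) then
      some (PySem.Str.strip verbatim)
    else
      none

-- ===== PORT B =====
def pvJobTableB : List (String × List String) :=
  [("install", ["install", "installing", "put up", "putting up", "mount", "mounting"]),
   ("level", ["level", "leveling", "make even", "straighten", "align"]),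
   ("wire", ["wire", "wiring", "connect", "hardwire"]),
   ("position", ["position", "place", "locate"]),
   ("adjust", ["adjust", "reposition", "move"]),
   ("replace", ["replace", "swap", "change out"]),
   ("illuminate", ["light", "illuminate", "brighten"]),
   ("decorate", ["decorate", "accent", "highlight"])]

def pvLocationTableB : List (List String × String) :=
  [(["picture", "artwork", "frame"], "picture/artwork lighting"),
   (["closet"], "closet lighting"),
   (["under cabinet", "cabinet"], "under-cabinet lighting"),
   (["stair"], "stair lighting"),
   (["bathroom", "vanity"], "bathroom/vanity lighting"),
   (["garage", "basement"], "utility lighting")]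

def pvFallbackWordsB : List String := ["install", "put", "mount", "add", "attach"]

def pvAllKeywordsB : List (List Char) :=
  (pvJobTableB.flatMap (fun jp => jp.2)).map String.toList
    ++ (pvLocationTableB.flatMap (fun ls => ls.1)).map String.toList

-- the first-character index of the keywords (kw.headD: Python kw[0]; every
-- keyword in the tables is nonempty, so the default is never read)
def pvByFirst (kws : List (List Char)) : PySem.Dict Char (List (List Char)) :=
  kws.foldl (fun d kw => d.modify (kw.headD ' ') [] (· ++ [kw])) PySem.Dict.empty

-- one position of the sweep: record every bucket keyword starting at this position
def pvScanStep (kws : List (List Char)) (suf : List Char)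
    (acc : PySem.Set (List Char)) : PySem.Set (List Char) :=
  kws.foldl (fun a kw => if PySem.Chars.startswith suf kw then PySem.Set.add a kw else a) acc

-- the left-to-right sweep: 'for i, ch in enumerate(text)' as recursion on the
-- suffixes; at each position only the bucket the current character selects is tried
def pvScan (byf : PySem.Dict Char (List (List Char))) : List Char → PySem.Set (List Char) → PySem.Set (List Char)
  | [], acc => acc
  | c :: rest, acc => pvScan byf rest (pvScanStep (byf.getD c []) (c :: rest) acc)

-- first job type whose pattern set intersects the hit set (pure lookups)
def pvFindJobB (hits : PySem.Set (List Char)) : List (String × List String) → Option String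
  | [] => none
  | (jt, pats) :: rest =>
    if pats.any (fun p => hits.contains p.toList) then some jt else pvFindJobB hits rest

-- first location group intersecting the hit set, default 'lighting fixture'
def pvSuffixB (hits : PySem.Set (List Char)) : List (List String × String) → String
  | [] => "lighting fixture"
  | (kws, sfx) :: rest =>
    if kws.any (fun k => hits.contains k.toList) then sfx else pvSuffixB hits rest

def extract_job_from_context_py_alt (verbatim : String) (context : String) : Option String :=
  let text := PySem.Str.lower (verbatim ++ " " ++ context)
  let hits := pvScan (pvByFirst pvAllKeywordsB) text.toList []
  match pvFindJobB hits pvJobTableB with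
  | some job_type => some (pyCapitalize job_type ++ " " ++ pvSuffixB hits pvLocationTableB)
  | none =>
    if pvScan (pvByFirst (pvFallbackWordsB.map String.toList)) (PySem.Str.lower verbatim).toList [] ≠ [] then
      some (PySem.Str.strip verbatim)
    else
      none

-- ===== PRECONDITION & SPEC =====
def Spec_extract_job_from_context_py (verbatim : String) (context : String) (out : Option String) : Prop := out = extract_job_from_context_py_alt verbatim context
instance (verbatim : String) (context : String) (out : Option String) : Decidable (Spec_extract_job_from_context_py verbatim context out) := by unfold Spec_extract_job_from_context_py; infer_instance

-- ===== CLAIM (what is proved, stated in full; the proofs are below) =====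
def Claim_equal_extract_job_from_context_py : Prop := ∀ (verbatim : String) (context : String), Dom_extract_job_from_context_py verbatim context → Spec_extract_job_from_context_py verbatim context (extract_job_from_context_py verbatim context)

-- ===== LEMMAS AND PROOFS =====

-- member-wise congruence for List.any (Mathlib's any_congr needs pointwise equality)
theorem pvAnyCongrMem (l : List String) (f g : String → Bool)
    (h : ∀ x ∈ l, f x = g x) : l.any f = l.any g := by
  induction l with
  | nil => rfl
  | cons hd tl ih =>
    simp only [List.any_cons, h hd List.mem_cons_self,
      ih (fun x hx => h x (List.mem_cons_of_mem _ hx))]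

-- the bucket for c holds exactly the listed keywords whose first character is c
theorem mem_pvByFirst (kws : List (List Char)) (c : Char) (kw : List Char) :
    kw ∈ (pvByFirst kws).getD c [] ↔ kw ∈ kws ∧ kw.headD ' ' = c := by
  have hfold : pvByFirst kws
      = (kws.map (fun kw => (kw.headD ' ', kw))).foldl
          (fun d p => d.modify p.1 [] (· ++ [p.2])) PySem.Dict.empty := by
    rw [List.foldl_map]; rfl
  rw [hfold, PySem.Dict.getD_foldl_modify_append, PySem.Dict.getD_empty]
  simp [List.filter_map, Function.comp]

-- membership in one sweep step
theorem mem_pvScanStep (kws : List (List Char)) (suf : List Char)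
    (acc : PySem.Set (List Char)) (kw : List Char) :
    kw ∈ pvScanStep kws suf acc ↔ kw ∈ acc ∨ (kw ∈ kws ∧ kw <+: suf) := by
  induction kws generalizing acc with
  | nil => simp [pvScanStep]
  | cons hd tl ih =>
    simp only [pvScanStep, List.foldl_cons] at *
    rw [ih]
    by_cases h : PySem.Chars.startswith suf hd = true
    · have hp : hd <+: suf := (PySem.Chars.startswith_iff suf hd).mp h
      simp only [h, if_true, PySem.Set.mem_add]
      constructor
      · rintro ((ha | rfl) | hb)
        · exact Or.inl ha
        · exact Or.inr ⟨List.mem_cons_self, hp⟩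
        · exact Or.inr ⟨List.mem_cons_of_mem _ hb.1, hb.2⟩
      · rintro (ha | ⟨hm, hpre⟩)
        · exact Or.inl (Or.inl ha)
        · rcases List.mem_cons.mp hm with rfl | hm'
          · exact Or.inl (Or.inr rfl)
          · exact Or.inr ⟨hm', hpre⟩
    · have hp : ¬ hd <+: suf := fun hh => h ((PySem.Chars.startswith_iff suf hd).mpr hh)
      rw [if_neg h]
      constructor
      · rintro (ha | hb); · exact Or.inl ha
        · exact Or.inr ⟨List.mem_cons_of_mem _ hb.1, hb.2⟩
      · rintro (ha | ⟨hm, hpre⟩)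
        · exact Or.inl ha
        · rcases List.mem_cons.mp hm with rfl | hm'
          · exact absurd hpre hp
          · exact Or.inr ⟨hm', hpre⟩

-- membership in the whole sweep: exactly the listed keywords occurring in the text
theorem mem_pvScan (kws : List (List Char)) (s : List Char)
    (acc : PySem.Set (List Char)) (kw : List Char) (hkw : kw ≠ []) :
    kw ∈ pvScan (pvByFirst kws) s acc ↔ kw ∈ acc ∨ (kw ∈ kws ∧ PySem.Chars.isIn kw s = true) := by
  induction s generalizing acc with
  | nil =>
    have hno : ¬ PySem.Chars.isIn kw [] = true := by
      rw [PySem.Chars.isIn_iff_infix]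
      intro h; exact hkw (List.eq_nil_of_infix_nil h)
    simp [pvScan, hno]
  | cons c rest ih =>
    simp only [pvScan]
    rw [ih, mem_pvScanStep]
    have hbucket : (kw ∈ (pvByFirst kws).getD c [] ∧ kw <+: c :: rest)
        ↔ (kw ∈ kws ∧ kw <+: c :: rest) := by
      rw [mem_pvByFirst]
      constructor
      · rintro ⟨⟨hm, _⟩, hpre⟩; exact ⟨hm, hpre⟩
      · rintro ⟨hm, hpre⟩
        refine ⟨⟨hm, ?_⟩, hpre⟩
        cases kw with
        | nil => exact absurd rfl hkw
        | cons k ks => exact (List.cons_prefix_cons.mp hpre).1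
    simp only [PySem.Chars.isIn_iff_infix, List.infix_cons_iff]
    rw [and_comm (a := kw ∈ (pvByFirst kws).getD c []), and_comm (a := kw ∈ kws)] at hbucket
    tauto

-- every collected element came from the keyword list
theorem pvScan_subset (kws : List (List Char)) (s : List Char)
    (acc : PySem.Set (List Char)) (kw : List Char) :
    kw ∈ pvScan (pvByFirst kws) s acc → kw ∈ acc ∨ kw ∈ kws := by
  induction s generalizing acc with
  | nil => exact fun h => Or.inl h
  | cons c rest ih =>
    intro h
    rcases ih _ h with hstep | hk
    · rcases (mem_pvScanStep ..).mp hstep with ha | hb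
      · exact Or.inl ha
      · exact Or.inr ((mem_pvByFirst kws c kw).mp hb.1).1
    · exact Or.inr hk

-- the text-sweep hit set answers 'kw in text' for every listed, nonempty keyword
theorem contains_pvScan (kws : List (List Char)) (s : List Char) (p : String)
    (hmem : p.toList ∈ kws) (hne : p.toList ≠ []) :
    (pvScan (pvByFirst kws) s []).contains p.toList = PySem.Chars.isIn p.toList s := by
  have hmem' : p.toList ∈ pvScan (pvByFirst kws) s [] ↔ PySem.Chars.isIn p.toList s = true := by
    rw [mem_pvScan kws s [] p.toList hne]; simp [hmem]
  rw [Bool.eq_iff_iff]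
  simp [hmem']

-- A's if-elif chain on a matched job equals B's composition with the table-driven suffix (on hits)
theorem pvChain_eq_suffix (t : String) (jt : String)
    (hguard : ∀ p : String, p.toList ∈ pvAllKeywordsB → p.toList ≠ [] →
      (pvScan (pvByFirst pvAllKeywordsB) t.toList []).contains p.toList = PySem.Chars.isIn p.toList t.toList) :
    (if PySem.Str.isIn "picture" t || PySem.Str.isIn "artwork" t || PySem.Str.isIn "frame" t then
       pyCapitalize jt ++ " picture/artwork lighting"
     else if PySem.Str.isIn "closet" t then
       pyCapitalize jt ++ " closet lighting"
     else if PySem.Str.isIn "under cabinet" t || PySem.Str.isIn "cabinet" t then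
       pyCapitalize jt ++ " under-cabinet lighting"
     else if PySem.Str.isIn "stair" t then
       pyCapitalize jt ++ " stair lighting"
     else if PySem.Str.isIn "bathroom" t || PySem.Str.isIn "vanity" t then
       pyCapitalize jt ++ " bathroom/vanity lighting"
     else if PySem.Str.isIn "garage" t || PySem.Str.isIn "basement" t then
       pyCapitalize jt ++ " utility lighting"
     else
       pyCapitalize jt ++ " lighting fixture") =
    pyCapitalize jt ++ " " ++ pvSuffixB (pvScan (pvByFirst pvAllKeywordsB) t.toList []) pvLocationTableB := by
  simp only [pvSuffixB, pvLocationTableB, List.any_cons, List.any_nil, Bool.or_false,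
    PySem.Str.isIn_eq,
    hguard "picture" (by decide) (by decide), hguard "artwork" (by decide) (by decide),
    hguard "frame" (by decide) (by decide), hguard "closet" (by decide) (by decide),
    hguard "under cabinet" (by decide) (by decide), hguard "cabinet" (by decide) (by decide),
    hguard "stair" (by decide) (by decide), hguard "bathroom" (by decide) (by decide),
    hguard "vanity" (by decide) (by decide), hguard "garage" (by decide) (by decide),
    hguard "basement" (by decide) (by decide), Bool.or_assoc, String.append_assoc]
  split_ifs <;> rfl

-- A's early-return job loop equals find-then-compose over the hit set
theorem pvLoop_eq (t : String) (l : List (String × List String))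
    (hl : ∀ jp ∈ l, ∀ p ∈ jp.2, p.toList ∈ pvAllKeywordsB ∧ p.toList ≠ [])
    (hguard : ∀ p : String, p.toList ∈ pvAllKeywordsB → p.toList ≠ [] →
      (pvScan (pvByFirst pvAllKeywordsB) t.toList []).contains p.toList = PySem.Chars.isIn p.toList t.toList) :
    pvAJobLoop t l =
      (pvFindJobB (pvScan (pvByFirst pvAllKeywordsB) t.toList []) l).map
        (fun jt => pyCapitalize jt ++ " " ++ pvSuffixB (pvScan (pvByFirst pvAllKeywordsB) t.toList []) pvLocationTableB) := by
  induction l with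
  | nil => rfl
  | cons hd tl ih =>
    obtain ⟨jt, pats⟩ := hd
    have hpats : (pats.any fun p => PySem.Str.isIn p t)
        = pats.any (fun p => (pvScan (pvByFirst pvAllKeywordsB) t.toList []).contains p.toList) := by
      apply pvAnyCongrMem
      intro p hp
      have h := hl (jt, pats) List.mem_cons_self p hp
      rw [PySem.Str.isIn_eq, ← hguard p h.1 h.2]
    by_cases h : (pats.any fun p => (pvScan (pvByFirst pvAllKeywordsB) t.toList []).contains p.toList) = true
    · simp only [pvAJobLoop, pvFindJobB, hpats, h, if_true, Option.map_some]
      exact congrArg some (pvChain_eq_suffix t jt hguard)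
    · simp only [pvAJobLoop, pvFindJobB, hpats, h, Bool.false_eq_true, if_false]
      exact ih (fun jp hjp => hl jp (List.mem_cons_of_mem _ hjp))

-- A's fallback 'any word in verbatim' equals B's 'sweep of verbatim is nonempty'
theorem pvFallback_eq (v : String) :
    (["install", "put", "mount", "add", "attach"].any
        (fun word => PySem.Str.isIn word (PySem.Str.lower v)))
      = decide (pvScan (pvByFirst (pvFallbackWordsB.map String.toList)) (PySem.Str.lower v).toList [] ≠ []) := by
  have hwords : ∀ kw ∈ pvFallbackWordsB.map String.toList, kw ≠ [] := by decide
  by_cases h : (["install", "put", "mount", "add", "attach"].any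
      (fun word => PySem.Str.isIn word (PySem.Str.lower v))) = true
  · rw [h]
    rcases (by simpa [List.any_eq_true] using h :
        ∃ w ∈ (["install", "put", "mount", "add", "attach"] : List String),
          PySem.Str.isIn w (PySem.Str.lower v) = true) with ⟨w, hw, hin⟩
    have hwk : w.toList ∈ pvFallbackWordsB.map String.toList := by
      fin_cases hw <;> decide
    rw [PySem.Str.isIn_eq] at hin
    have hmem : w.toList ∈ pvScan (pvByFirst (pvFallbackWordsB.map String.toList)) (PySem.Str.lower v).toList [] :=
      (mem_pvScan _ _ [] w.toList (hwords _ hwk)).mpr (Or.inr ⟨hwk, hin⟩)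
    symm; rw [decide_eq_true_iff]
    exact List.ne_nil_of_mem hmem
  · rw [eq_false_of_ne_true h]
    symm; rw [decide_eq_false_iff_not, not_not, List.eq_nil_iff_forall_not_mem]
    intro x hx
    have hxk : x ∈ pvFallbackWordsB.map String.toList :=
      (pvScan_subset _ _ [] x hx).resolve_left (by simp)
    have hxin := ((mem_pvScan _ _ [] x (hwords _ hxk)).mp hx).resolve_left (by simp)
    rcases List.mem_map.mp hxk with ⟨w, hwmem, rfl⟩
    have hwA : w ∈ (["install", "put", "mount", "add", "attach"] : List String) := by
      fin_cases hwmem <;> decide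
    have hfalse : PySem.Str.isIn w (PySem.Str.lower v) = false := by
      exact eq_false_of_ne_true (List.any_eq_false.mp (eq_false_of_ne_true h) w hwA)
    rw [PySem.Str.isIn_eq] at hfalse
    rw [hfalse] at hxin
    exact absurd hxin.2 (by simp)

-- ===== VERDICT (by name: the statement is the Claim_ definition above) =====
theorem extract_job_from_context_py_spec : Claim_equal_extract_job_from_context_py := by
  intro verbatim context _
  unfold Spec_extract_job_from_context_py
  simp only [extract_job_from_context_py, extract_job_from_context_py_alt]
  have hguard := fun p hm hn =>
    contains_pvScan pvAllKeywordsB (PySem.Str.lower (verbatim ++ " " ++ context)).toList p hm hn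
  have hl : ∀ jp ∈ pvJobPatternsA, ∀ p ∈ jp.2, p.toList ∈ pvAllKeywordsB ∧ p.toList ≠ [] := by
    decide
  rw [show pvJobPatternsA = pvJobTableB from rfl] at hl
  rw [show (pvAJobLoop (PySem.Str.lower (verbatim ++ " " ++ context)) pvJobPatternsA)
        = pvAJobLoop (PySem.Str.lower (verbatim ++ " " ++ context)) pvJobTableB from rfl,
     pvLoop_eq (PySem.Str.lower (verbatim ++ " " ++ context)) pvJobTableB hl hguard]
  cases pvFindJobB (pvScan (pvByFirst pvAllKeywordsB) (PySem.Str.lower (verbatim ++ " " ++ context)).toList [])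
      pvJobTableB with
  | some jt => rfl
  | none =>
    simp only [Option.map_none]
    rw [pvFallback_eq verbatim]
    simp
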